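-- pv_equiv track=rewrite | github.com/jeemyeong/problem-solving | geeks/connect_node.py | solve
-- ===== SOURCE A (Python) =====
-- import sys, collections
--
-- class Node(object):
--     def __init__(self, value, head=None):
--         self.value = value
--         self.head = head
--         self.left = None
--         self.right = None
--         self.nextRight = None
--
--     def __str__(self):
--         return "Node: {}".format(self.value)
--
-- def solve(n, nodes):
--     nodes = nodes.split()
--     tree = dict()
--     tree[int(nodes[0])] = Node(int(nodes[0]))
--     for i in range(0, 3*n, 3):
--         head = tree[int(nodes[i])]
--         node = Node(value=int(nodes[i+1]), head=head)
--         tree[int(nodes[i+1])] = node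
--         direction = nodes[i+2]
--         if direction == "L":
--             head.left = node
--         elif direction == "R":
--             head.right = node
--
--     # for i in tree:
--     #     node = tree[i]
--     #     if node.left is not None:
--     #         node.left.nextRight = get_next_right(node.left)
--     #     if node.right is not None:
--     #         node.right.nextRight = get_next_right(node.right)
--
--     q = collections.deque()
--     q.append(tree[int(nodes[0])])
--     ret1 = []
--     while q:
--         size = len(q)
--         for _ in range(size):
--             cur = q.popleft()
--             if cur is None:
--                 continue
--             ret1.append(cur.value)
--             q.append(cur.left)
--             q.append(cur.right)
--     stack = []
--     stack.append(tree[int(nodes[0])])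
--     ret2 = []
--     visited = [0]*1001
--     while stack:
--         cur = stack.pop()
--         if cur is None:
--             continue
--         if visited[cur.value] is True:
--             ret2.append(cur.value)
--             continue
--         visited[cur.value] = True
--         stack.append(cur.right)
--         stack.append(cur)
--         stack.append(cur.left)
--     return " ".join(map(str, ret1)) + "\n" + " ".join(map(str, ret2))
-- ===== SOURCE B (Python) =====
-- def solve(n, nodes):
--     toks = nodes.split()
--     root = int(toks[0])
--     left, right = {}, {}
--     for i in range(n):
--         p, c, d = int(toks[3 * i]), int(toks[3 * i + 1]), toks[3 * i + 2]
--         if d == "L":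
--             left[p] = c
--         elif d == "R":
--             right[p] = c
--     ret1 = []
--     level = [root]
--     while level:
--         nxt = []
--         for v in level:
--             ret1.append(v)
--             if v in left:
--                 nxt.append(left[v])
--             if v in right:
--                 nxt.append(right[v])
--         level = nxt
--     ret2 = []
--     def inorder(v):
--         if v in left:
--             inorder(left[v])
--         ret2.append(v)
--         if v in right:
--             inorder(right[v])
--     inorder(root)
--     return " ".join(map(str, ret1)) + "\n" + " ".join(map(str, ret2))
-- ===== Notes on version B (the rewrite author's own statement) =====
-- stated objective: simpler
-- what changed: B drops A's mutable Node-object graph, deque-with-None level loop and stack-plus-global-visited-array in-order walk, and instead builds two plain value-keyed child dicts, runs BFS over level lists of values, and emits the in-order sequence with a direct recursive traversal.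
-- outside the precondition, e.g. on solve(2, '1 2 L 2 1 L'): A returns '1\n1', B does not finish within the time limit; on solve(1, '1 -1 L'): A returns '1 -1\n-1 1', B returns '1 -1\n-1 1'; on solve(1, '1 5000 X'): A returns '1\n1', B returns '1\n1'
import Mathlib
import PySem

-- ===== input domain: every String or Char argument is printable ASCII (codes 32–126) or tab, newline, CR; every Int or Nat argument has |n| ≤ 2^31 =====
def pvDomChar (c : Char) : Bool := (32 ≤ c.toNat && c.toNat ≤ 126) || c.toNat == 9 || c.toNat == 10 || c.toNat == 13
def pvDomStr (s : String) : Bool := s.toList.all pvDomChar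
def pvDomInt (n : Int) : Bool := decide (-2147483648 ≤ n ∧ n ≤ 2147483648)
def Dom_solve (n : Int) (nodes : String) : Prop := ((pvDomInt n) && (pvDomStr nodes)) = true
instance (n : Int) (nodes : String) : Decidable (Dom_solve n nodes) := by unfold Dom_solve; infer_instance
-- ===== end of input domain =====

-- B replaces A's mutable Node-object graph, deque BFS over object references and
-- stack+global-visited-array in-order walk by two plain value-keyed child maps, a
-- level-list BFS and a recursive in-order traversal (objective: simpler).
-- Pre_ (see there) restricts to inputs where A's value-keyed dict/visited bookkeeping
-- is not accidental: distinct node values in 0..1000, parseable tokens, parents present.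

-- ===== PORT A =====
-- Python `tree` maps a value to a mutable Node object; under Pre_ (distinct values)
-- object identity coincides with the value key, so the store is a Dict from value to
-- the (left, right) child values; exact on Pre_.
abbrev PvNodeD := PySem.Dict Int (Option Int × Option Int)

-- the `for i in range(0, 3*n, 3)` construction loop; `none` = the Python raise
-- (IndexError / ValueError / KeyError)
def pvBuildA (toks : List String) : List Int → PvNodeD → Option PvNodeD
  | [], tree => some tree
  | i :: rest, tree =>
    match PySem.List.pyGet? toks i with
    | none => none
    | some si =>
      match PySem.Int.ofStr? si with
      | none => none
      | some p =>
        match tree.get? p with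
        | none => none          -- KeyError: head = tree[int(nodes[i])]
        | some _ =>
          match PySem.List.pyGet? toks (i + 1) with
          | none => none
          | some sc =>
            match PySem.Int.ofStr? sc with
            | none => none
            | some c =>
              let tree1 := tree.insert c (none, none)
              match PySem.List.pyGet? toks (i + 2) with
              | none => none
              | some d =>
                let tree2 :=
                  if d = "L" then tree1.modify p (none, none) (fun pr => (some c, pr.2))
                  else if d = "R" then tree1.modify p (none, none) (fun pr => (pr.1, some c))
                  else tree1
                pvBuildA toks rest tree2

-- the `while q:` / `for _ in range(size)` level loop; the inner for-loop pops exactly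
-- the current queue and appends the next level, so one outer iteration folds over q.
-- Fuel only bounds the number of levels (the Python loop has no bound); on Pre_ inputs
-- it never runs out.
def pvBfsA (tree : PvNodeD) : Nat → List (Option Int) → List Int → List Int
  | 0, _, ret => ret
  | fuel + 1, q, ret =>
    if q.isEmpty then ret
    else
      let st := q.foldl
        (fun (st : List Int × List (Option Int)) cur =>
          match cur with
          | none => st
          | some v =>
            let pr := tree.getD v (none, none)
            (st.1 ++ [v], st.2 ++ [pr.1, pr.2])) (ret, [])
      pvBfsA tree fuel st.2 st.1

-- lemma the port's termination measure cites
theorem pv_count_false_set (l : List Bool) (k : Nat) (h : l[k]? = some false) :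
    (l.set k true).count false + 1 = l.count false := by
  induction l generalizing k with
  | nil => simp at h
  | cons a t ih =>
    cases k with
    | zero => simp_all
    | succ m =>
      simp only [List.getElem?_cons_succ] at h
      simp [List.count_cons, ← ih m h]
      omega

theorem pv_count_false_pySetD (vis : List Bool) (i : Int)
    (h : PySem.List.pyGet? vis i = some false) :
    (PySem.List.pySetD vis i true).count false + 1 = vis.count false := by
  simp only [PySem.List.pyGet?, PySem.List.pySetD, PySem.List.pySet?] at *
  cases hk : PySem.List.pyIdx? vis.length i with
  | none => simp [hk] at h
  | some k =>
    simp only [hk, Option.bind_some, Option.map_some, Option.getD_some] at h ⊢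
    exact pv_count_false_set vis k h

-- the `while stack:` in-order loop with the value-indexed visited array;
-- `none` = IndexError on `visited[cur.value]`
def pvInoA (tree : PvNodeD) : List (Option Int) → List Bool → List Int → Option (List Int)
  | [], _, ret => some ret
  | none :: st, vis, ret => pvInoA tree st vis ret
  | some v :: st, vis, ret =>
    match h : PySem.List.pyGet? vis v with
    | none => none
    | some true => pvInoA tree st vis (ret ++ [v])
    | some false =>
      let pr := tree.getD v (none, none)
      pvInoA tree (pr.1 :: some v :: pr.2 :: st) (PySem.List.pySetD vis v true) ret
termination_by st vis _ => 3 * vis.count false + st.length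
decreasing_by
  all_goals simp [List.length_cons]
  have h1 := pv_count_false_pySetD vis v h
  omega

def solve (n : Int) (nodes : String) : String :=
  let toks := PySem.Str.split₀ nodes
  match PySem.List.pyGet? toks 0 with
  | none => ""                  -- IndexError: nodes[0]
  | some s0 =>
    match PySem.Int.ofStr? s0 with
    | none => ""                -- ValueError: int(nodes[0])
    | some v0 =>
      let tree0 : PvNodeD := (PySem.Dict.empty).insert v0 (none, none)
      match pvBuildA toks (PySem.List.pyRange 0 (3 * n) 3) tree0 with
      | none => ""
      | some tree =>
        let ret1 := pvBfsA tree (toks.length + 2) [some v0] []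
        match pvInoA tree [some v0] (List.replicate 1001 false) [] with
        | none => ""
        | some ret2 =>
          PySem.Str.join " " (ret1.map PySem.Int.toStr) ++ "\n" ++
            PySem.Str.join " " (ret2.map PySem.Int.toStr)

-- ===== PORT B =====
-- the `for i in range(n)` loop building the two child maps
def pvBuildB (toks : List String) :
    List Int → PySem.Dict Int Int × PySem.Dict Int Int →
    Option (PySem.Dict Int Int × PySem.Dict Int Int)
  | [], m => some m
  | i :: rest, (l, r) =>
    match PySem.List.pyGet? toks (3 * i) with
    | none => none
    | some sp =>
      match PySem.Int.ofStr? sp with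
      | none => none
      | some p =>
        match PySem.List.pyGet? toks (3 * i + 1) with
        | none => none
        | some sc =>
          match PySem.Int.ofStr? sc with
          | none => none
          | some c =>
            match PySem.List.pyGet? toks (3 * i + 2) with
            | none => none
            | some d =>
              if d = "L" then pvBuildB toks rest (l.insert p c, r)
              else if d = "R" then pvBuildB toks rest (l, r.insert p c)
              else pvBuildB toks rest (l, r)

-- the `while level:` loop; fuel bounds the number of levels, never reached on Pre_
def pvBfsB (l r : PySem.Dict Int Int) : Nat → List Int → List Int → List Int
  | 0, _, ret => ret
  | fuel + 1, level, ret =>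
    if level.isEmpty then ret
    else
      let st := level.foldl
        (fun (st : List Int × List Int) v =>
          let s1 := st.1 ++ [v]
          let n1 := match l.get? v with | some c => st.2 ++ [c] | none => st.2
          let n2 := match r.get? v with | some c => n1 ++ [c] | none => n1
          (s1, n2)) (ret, [])
      pvBfsB l r fuel st.2 st.1

-- the recursive `inorder`; fuel bounds the recursion depth, never reached on Pre_
def pvInoB (l r : PySem.Dict Int Int) : Nat → Int → List Int → List Int
  | 0, _, ret => ret
  | fuel + 1, v, ret =>
    let ret1 := match l.get? v with | some c => pvInoB l r fuel c ret | none => ret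
    let ret2 := ret1 ++ [v]
    match r.get? v with | some c => pvInoB l r fuel c ret2 | none => ret2

def solve_alt (n : Int) (nodes : String) : String :=
  let toks := PySem.Str.split₀ nodes
  match PySem.List.pyGet? toks 0 with
  | none => ""
  | some s0 =>
    match PySem.Int.ofStr? s0 with
    | none => ""
    | some root =>
      match pvBuildB toks (PySem.List.pyRange 0 n 1) (PySem.Dict.empty, PySem.Dict.empty) with
      | none => ""
      | some (l, r) =>
        let ret1 := pvBfsB l r (toks.length + 2) [root] []
        let ret2 := pvInoB l r (toks.length + 2) root []
        PySem.Str.join " " (ret1.map PySem.Int.toStr) ++ "\n" ++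
          PySem.Str.join " " (ret2.map PySem.Int.toStr)

-- ===== PRECONDITION & SPEC =====
-- the value parsed at token index j (0 when absent/unparseable — Pre_ demands success)
def pvVal (toks : List String) (j : Nat) : Int :=
  (PySem.Int.ofStr? (toks.getD j "")).getD 0

-- node values present after the first k triples: the root, then each triple's child
def pvSeen (toks : List String) (k : Nat) : List Int :=
  pvVal toks 0 :: (List.range k).map (fun i => pvVal toks (3 * i + 1))

-- Pre_ excludes exactly: inputs where A raises (missing/unparseable tokens, a parent
-- value not yet in the tree (KeyError), a node value outside the fixed visited array
-- (IndexError)), and two defensible-corner regions where A's value-keyed bookkeeping is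
-- accidental: duplicate node values (the tree dict silently collapses nodes) and values
-- outside 0..1000 that A happens to survive (negative indices alias the visited array,
-- unattached out-of-range nodes are never checked).
def Pre_solve (n : Int) (nodes : String) : Prop :=
  let toks := PySem.Str.split₀ nodes
  let N := n.toNat
  toks ≠ [] ∧ 3 * N ≤ toks.length ∧
  (PySem.Int.ofStr? (toks.getD 0 "")).isSome = true ∧
  0 ≤ pvVal toks 0 ∧ pvVal toks 0 ≤ 1000 ∧
  ∀ i < N,
    (PySem.Int.ofStr? (toks.getD (3 * i) "")).isSome = true ∧
    (PySem.Int.ofStr? (toks.getD (3 * i + 1) "")).isSome = true ∧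
    pvVal toks (3 * i) ∈ pvSeen toks i ∧
    pvVal toks (3 * i + 1) ∉ pvSeen toks i ∧
    0 ≤ pvVal toks (3 * i + 1) ∧ pvVal toks (3 * i + 1) ≤ 1000

instance (n : Int) (nodes : String) : Decidable (Pre_solve n nodes) := by
  unfold Pre_solve; infer_instance

def pvWitness_solve : Int × String := (2, "1 2 L 1 3 R")

def Spec_solve (n : Int) (nodes : String) (out : String) : Prop := out = solve_alt n nodes
instance (n : Int) (nodes : String) (out : String) : Decidable (Spec_solve n nodes out) := by
  unfold Spec_solve; infer_instance

-- ===== CLAIM (what is proved, stated in full; the proofs are below) =====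
def Claim_equal_solve : Prop :=
  ∀ (n : Int) (nodes : String), Dom_solve n nodes → Pre_solve n nodes →
    Spec_solve n nodes (solve n nodes)

-- ===== LEMMAS AND PROOFS =====

-- the Pre_ condition on the triples, as a standalone hypothesis
def PvPre (toks : List String) (N : Nat) : Prop :=
  ∀ i < N,
    (PySem.Int.ofStr? (toks.getD (3 * i) "")).isSome = true ∧
    (PySem.Int.ofStr? (toks.getD (3 * i + 1) "")).isSome = true ∧
    pvVal toks (3 * i) ∈ pvSeen toks i ∧
    pvVal toks (3 * i + 1) ∉ pvSeen toks i ∧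
    0 ≤ pvVal toks (3 * i + 1) ∧ pvVal toks (3 * i + 1) ≤ 1000

theorem pvSeen_succ (toks : List String) (k : Nat) :
    pvSeen toks (k + 1) = pvSeen toks k ++ [pvVal toks (3 * k + 1)] := by
  simp [pvSeen, List.range_succ]

theorem pvSeen_mono {toks : List String} {j k : Nat} (h : j ≤ k) {u : Int}
    (hu : u ∈ pvSeen toks j) : u ∈ pvSeen toks k := by
  simp only [pvSeen, List.mem_cons, List.mem_map, List.mem_range] at hu ⊢
  rcases hu with h0 | ⟨i, hi, he⟩
  · exact Or.inl h0
  · exact Or.inr ⟨i, lt_of_lt_of_le hi h, he⟩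

theorem pvSeen_nodup {toks : List String} {N : Nat} (hP : PvPre toks N) :
    (pvSeen toks N).Nodup := by
  induction N with
  | zero => simp [pvSeen]
  | succ k ih =>
    have hk : PvPre toks k := fun i hi => hP i (Nat.lt_succ_of_lt hi)
    rw [pvSeen_succ]
    refine List.Nodup.append (ih hk) (by simp) ?_
    intro a ha hb
    simp only [List.mem_singleton] at hb
    subst hb
    exact (hP k (Nat.lt_succ_self k)).2.2.2.1 ha

theorem pvSeen_range {toks : List String} {N : Nat} (hP : PvPre toks N)
    (h0 : 0 ≤ pvVal toks 0 ∧ pvVal toks 0 ≤ 1000) :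
    ∀ w ∈ pvSeen toks N, 0 ≤ w ∧ w ≤ 1000 := by
  intro w hw
  simp only [pvSeen, List.mem_cons, List.mem_map, List.mem_range] at hw
  rcases hw with h | ⟨i, hi, he⟩
  · exact h ▸ h0
  · have := (hP i hi).2.2.2.2
    omega

theorem pv_idxOf_take {x : Int} {l : List Int} {m : Nat} (h : x ∈ l.take m) :
    l.idxOf x < m := by
  induction l generalizing m with
  | nil => simp at h
  | cons a t ih =>
    cases m with
    | zero => simp at h
    | succ m' =>
      simp only [List.take_succ_cons, List.mem_cons] at h
      by_cases hx : a = x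
      · simp [hx]
      · rcases h with h | h
        · exact absurd h.symm hx
        · have hb : (a == x) = false := by simp [hx]
          simp only [List.idxOf_cons, hb, cond_false]
          exact Nat.succ_lt_succ (ih h)

theorem pv_idxOf_of_getElem {l : List Int} {m : Nat} {x : Int}
    (hnd : l.Nodup) (h : l[m]? = some x) : l.idxOf x = m := by
  induction l generalizing m with
  | nil => simp at h
  | cons a t ih =>
    cases m with
    | zero =>
      simp only [List.getElem?_cons_zero, Option.some.injEq] at h
      simp [h]
    | succ m' =>
      simp only [List.getElem?_cons_succ] at h
      have hne : a ≠ x := by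
        intro he
        subst he
        exact (List.nodup_cons.mp hnd).1 (List.mem_of_getElem? h)
      have hb : (a == x) = false := by simp [hne]
      simp [List.idxOf_cons, hb, ih (List.nodup_cons.mp hnd).2 h]

theorem pvSeen_take {toks : List String} {j N : Nat} (h : j ≤ N) :
    pvSeen toks j = (pvSeen toks N).take (j + 1) := by
  simp only [pvSeen, List.take_succ_cons]
  rw [← List.map_take, List.take_range]
  simp [Nat.min_eq_left h]

theorem pvSeen_get {toks : List String} {j N : Nat} (h : j < N) :
    (pvSeen toks N)[j + 1]? = some (pvVal toks (3 * j + 1)) := by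
  simp [pvSeen, h]

-- one Python raise-free build step exists iff the parse succeeded: o = some (o.getD 0)
theorem pv_some_getD {o : Option Int} (h : o.isSome = true) : o = some (o.getD 0) := by
  cases o <;> simp_all

theorem pv_mem_seen_of_val {toks : List String} {N j : Nat} (h : j < N) :
    pvVal toks (3 * j + 1) ∈ pvSeen toks N := by
  exact pvSeen_mono (Nat.succ_le_of_lt h)
    (by rw [pvSeen_succ]; simp)

-- edges of B's child maps, and reachability along them
def pvEdge (lB rB : PySem.Dict Int Int) (u c : Int) : Prop :=
  lB.get? u = some c ∨ rB.get? u = some c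

def pvReach (lB rB : PySem.Dict Int Int) : Int → Int → Prop :=
  Relation.ReflTransGen (pvEdge lB rB)

-- the joint invariant of the two construction loops after k triples
structure PvInv (toks : List String) (N k : Nat) (tree : PvNodeD)
    (lB rB : PySem.Dict Int Int) : Prop where
  lookD : ∀ v : Int, tree.getD v (none, none) =
    if v ∈ pvSeen toks k then (lB.get? v, rB.get? v) else (none, none)
  mem : ∀ v : Int, tree.contains v = decide (v ∈ pvSeen toks k)
  eL : ∀ u c : Int, lB.get? u = some c →
    ∃ j, j < k ∧ c = pvVal toks (3 * j + 1) ∧ u ∈ pvSeen toks j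
  eR : ∀ u c : Int, rB.get? u = some c →
    ∃ j, j < k ∧ c = pvVal toks (3 * j + 1) ∧ u ∈ pvSeen toks j
  upL : ∀ u1 u2 c : Int, lB.get? u1 = some c → lB.get? u2 = some c → u1 = u2
  upR : ∀ u1 u2 c : Int, rB.get? u1 = some c → rB.get? u2 = some c → u1 = u2
  upX : ∀ u1 u2 c : Int, lB.get? u1 = some c → rB.get? u2 = some c → False

-- an edge's endpoints are seen values and its target was created later
theorem pv_idx_edge {toks : List String} {N : Nat} {tree : PvNodeD}
    {lB rB : PySem.Dict Int Int} (hI : PvInv toks N N tree lB rB)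
    (hnd : (pvSeen toks N).Nodup) {u c : Int} (he : pvEdge lB rB u c) :
    c ∈ pvSeen toks N ∧ u ∈ pvSeen toks N ∧
      (pvSeen toks N).idxOf u < (pvSeen toks N).idxOf c := by
  obtain ⟨j, hj, hc, hu⟩ := he.elim (hI.eL u c) (hI.eR u c)
  have hcm : c ∈ pvSeen toks N := hc ▸ pv_mem_seen_of_val hj
  have hum : u ∈ pvSeen toks N := pvSeen_mono (Nat.le_of_lt hj) hu
  refine ⟨hcm, hum, ?_⟩
  have hic : (pvSeen toks N).idxOf c = j + 1 :=
    pv_idxOf_of_getElem hnd (hc ▸ pvSeen_get hj)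
  have hiu : (pvSeen toks N).idxOf u < j + 1 := by
    apply pv_idxOf_take
    rw [← pvSeen_take (Nat.le_of_lt hj)]
    exact hu
  omega

theorem pv_reach_idx {toks : List String} {N : Nat} {tree : PvNodeD}
    {lB rB : PySem.Dict Int Int} (hI : PvInv toks N N tree lB rB)
    (hnd : (pvSeen toks N).Nodup) {v w : Int} (h : pvReach lB rB v w) :
    v = w ∨ ((pvSeen toks N).idxOf v < (pvSeen toks N).idxOf w ∧ w ∈ pvSeen toks N) := by
  induction h with
  | refl => exact Or.inl rfl
  | tail hax hxw ih =>
    obtain ⟨hcm, hum, hlt⟩ := pv_idx_edge hI hnd hxw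
    rcases ih with rfl | ⟨h1, _⟩
    · exact Or.inr ⟨hlt, hcm⟩
    · exact Or.inr ⟨lt_trans h1 hlt, hcm⟩

-- a node has at most one parent slot
theorem pv_edge_unique {toks : List String} {N : Nat} {tree : PvNodeD}
    {lB rB : PySem.Dict Int Int} (hI : PvInv toks N N tree lB rB)
    {x y w : Int} (h1 : pvEdge lB rB x w) (h2 : pvEdge lB rB y w) : x = y := by
  rcases h1 with h1 | h1 <;> rcases h2 with h2 | h2
  · exact hI.upL x y w h1 h2
  · exact (hI.upX x y w h1 h2).elim
  · exact (hI.upX y x w h2 h1).elim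
  · exact hI.upR x y w h1 h2

-- ancestors of a common node are linearly ordered
theorem pv_reach_linear {toks : List String} {N : Nat} {tree : PvNodeD}
    {lB rB : PySem.Dict Int Int} (hI : PvInv toks N N tree lB rB)
    {a w : Int} (hab : pvReach lB rB a w) :
    ∀ b, pvReach lB rB b w → pvReach lB rB a b ∨ pvReach lB rB b a := by
  induction hab with
  | refl => exact fun b hb => Or.inr hb
  | @tail x w hax hxw ih =>
    intro b hbw
    rcases Relation.ReflTransGen.cases_tail hbw with rfl | ⟨y, hby, hyw⟩
    · exact Or.inl (Relation.ReflTransGen.tail hax hxw)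
    · have := pv_edge_unique hI hyw hxw
      subst this
      exact ih b hby

-- an edge target cannot reach back to its source
theorem pv_no_reach_back {toks : List String} {N : Nat} {tree : PvNodeD}
    {lB rB : PySem.Dict Int Int} (hI : PvInv toks N N tree lB rB)
    (hnd : (pvSeen toks N).Nodup) {v c : Int} (he : pvEdge lB rB v c)
    (h : pvReach lB rB c v) : False := by
  obtain ⟨_, _, hlt⟩ := pv_idx_edge hI hnd he
  rcases pv_reach_idx hI hnd h with rfl | ⟨h1, _⟩
  · omega
  · omega

-- the two subtrees of a node are disjoint
theorem pv_child_disjoint {toks : List String} {N : Nat} {tree : PvNodeD}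
    {lB rB : PySem.Dict Int Int} (hI : PvInv toks N N tree lB rB)
    (hnd : (pvSeen toks N).Nodup) {v lc rc w : Int}
    (hl : lB.get? v = some lc) (hr : rB.get? v = some rc)
    (h1 : pvReach lB rB lc w) (h2 : pvReach lB rB rc w) : False := by
  rcases pv_reach_linear hI h1 rc h2 with h | h
  · rcases Relation.ReflTransGen.cases_tail h with rfl | ⟨y, hy, hyrc⟩
    · exact hI.upX v v _ hl hr
    · have := pv_edge_unique hI hyrc (Or.inr hr)
      subst this
      exact pv_no_reach_back hI hnd (Or.inl hl) hy
  · rcases Relation.ReflTransGen.cases_tail h with rfl | ⟨y, hy, hylc⟩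
    · exact hI.upX v v _ hl hr
    · have := pv_edge_unique hI hylc (Or.inl hl)
      subst this
      exact pv_no_reach_back hI hnd (Or.inr hr) hy

theorem pv_mem_seen_succ {toks : List String} {k : Nat} {v : Int} :
    v ∈ pvSeen toks (k + 1) ↔ v ∈ pvSeen toks k ∨ v = pvVal toks (3 * k + 1) := by
  rw [pvSeen_succ]; simp

-- shared facts about the k-th construction step
theorem pv_step_facts {toks : List String} {N k : Nat} {tree : PvNodeD}
    {lB rB : PySem.Dict Int Int} (hP : PvPre toks N) (hk : k < N)
    (hI : PvInv toks N k tree lB rB) :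
    pvVal toks (3 * k) ∈ pvSeen toks k ∧ pvVal toks (3 * k + 1) ∉ pvSeen toks k ∧
    pvVal toks (3 * k) ≠ pvVal toks (3 * k + 1) ∧
    lB.get? (pvVal toks (3 * k + 1)) = none ∧ rB.get? (pvVal toks (3 * k + 1)) = none ∧
    (∀ u c', lB.get? u = some c' → c' ∈ pvSeen toks k) ∧
    (∀ u c', rB.get? u = some c' → c' ∈ pvSeen toks k) := by
  obtain ⟨_, _, hpm, hcm, _⟩ := hP k hk
  have hfl : lB.get? (pvVal toks (3 * k + 1)) = none := by
    cases hg : lB.get? (pvVal toks (3 * k + 1)) with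
    | none => rfl
    | some x =>
      obtain ⟨j, hj, _, hmem⟩ := hI.eL _ _ hg
      exact absurd (pvSeen_mono (Nat.le_of_lt hj) hmem) hcm
  have hfr : rB.get? (pvVal toks (3 * k + 1)) = none := by
    cases hg : rB.get? (pvVal toks (3 * k + 1)) with
    | none => rfl
    | some x =>
      obtain ⟨j, hj, _, hmem⟩ := hI.eR _ _ hg
      exact absurd (pvSeen_mono (Nat.le_of_lt hj) hmem) hcm
  refine ⟨hpm, hcm, fun he => hcm (he ▸ hpm), hfl, hfr, ?_, ?_⟩
  · intro u c' hg
    obtain ⟨j, hj, hc', hmem⟩ := hI.eL _ _ hg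
    exact pvSeen_mono hj (hc' ▸ (by rw [pvSeen_succ]; simp))
  · intro u c' hg
    obtain ⟨j, hj, hc', hmem⟩ := hI.eR _ _ hg
    exact pvSeen_mono hj (hc' ▸ (by rw [pvSeen_succ]; simp))

theorem pv_inv_step_else {toks : List String} {N k : Nat} {tree : PvNodeD}
    {lB rB : PySem.Dict Int Int} (hP : PvPre toks N) (hk : k < N)
    (hI : PvInv toks N k tree lB rB) :
    PvInv toks N (k + 1) (tree.insert (pvVal toks (3 * k + 1)) (none, none)) lB rB := by
  obtain ⟨hpm, hcm, hpc, hfl, hfr, hoL, hoR⟩ := pv_step_facts hP hk hI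
  refine ⟨?_, ?_, ?_, ?_, hI.upL, hI.upR, hI.upX⟩
  · intro v
    rw [PySem.Dict.getD_insert]
    by_cases hvc : v = pvVal toks (3 * k + 1)
    · rw [if_pos hvc, if_pos (pv_mem_seen_succ.mpr (Or.inr hvc)), hvc, hfl, hfr]
    · rw [if_neg hvc, hI.lookD v]
      by_cases hvs : v ∈ pvSeen toks k
      · rw [if_pos hvs, if_pos (pv_mem_seen_succ.mpr (Or.inl hvs))]
      · rw [if_neg hvs, if_neg (fun h => (pv_mem_seen_succ.mp h).elim hvs hvc)]
  · intro v
    rw [PySem.Dict.contains_insert, hI.mem v]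
    by_cases hvc : v = pvVal toks (3 * k + 1) <;> simp [pv_mem_seen_succ, hvc]
  · intro u c' hg
    obtain ⟨j, hj, h1, h2⟩ := hI.eL u c' hg
    exact ⟨j, Nat.lt_succ_of_lt hj, h1, h2⟩
  · intro u c' hg
    obtain ⟨j, hj, h1, h2⟩ := hI.eR u c' hg
    exact ⟨j, Nat.lt_succ_of_lt hj, h1, h2⟩

theorem pv_inv_step_L {toks : List String} {N k : Nat} {tree : PvNodeD}
    {lB rB : PySem.Dict Int Int} (hP : PvPre toks N) (hk : k < N)
    (hI : PvInv toks N k tree lB rB) :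
    PvInv toks N (k + 1)
      ((tree.insert (pvVal toks (3 * k + 1)) (none, none)).modify (pvVal toks (3 * k))
        (none, none) (fun pr => (some (pvVal toks (3 * k + 1)), pr.2)))
      (lB.insert (pvVal toks (3 * k)) (pvVal toks (3 * k + 1))) rB := by
  obtain ⟨hpm, hcm, hpc, hfl, hfr, hoL, hoR⟩ := pv_step_facts hP hk hI
  refine ⟨?_, ?_, ?_, ?_, ?_, hI.upR, ?_⟩
  · intro v
    simp only [PySem.Dict.getD_modify, PySem.Dict.getD_insert, PySem.Dict.get?_insert]
    by_cases hvp : v = pvVal toks (3 * k)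
    · rw [if_pos hvp, if_pos hvp, if_neg hpc, hI.lookD, if_pos hpm,
        if_pos (pv_mem_seen_succ.mpr (Or.inl (hvp ▸ hpm)))]
      rw [hvp]
    · rw [if_neg hvp, if_neg hvp]
      by_cases hvc : v = pvVal toks (3 * k + 1)
      · rw [if_pos hvc, if_pos (pv_mem_seen_succ.mpr (Or.inr hvc)), hvc, hfl, hfr]
      · rw [if_neg hvc, hI.lookD v]
        by_cases hvs : v ∈ pvSeen toks k
        · rw [if_pos hvs, if_pos (pv_mem_seen_succ.mpr (Or.inl hvs))]
        · rw [if_neg hvs, if_neg (fun h => (pv_mem_seen_succ.mp h).elim hvs hvc)]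
  · intro v
    rw [PySem.Dict.contains_modify, PySem.Dict.contains_insert, hI.mem v]
    by_cases hvp : v = pvVal toks (3 * k)
    · simp [hvp, pv_mem_seen_succ, hpm]
    · have b1 : (v == pvVal toks (3 * k)) = false := by simp [hvp]
      by_cases hvc : v = pvVal toks (3 * k + 1)
      · simp [hvc, pv_mem_seen_succ]
      · have b2 : (v == pvVal toks (3 * k + 1)) = false := by simp [hvc]
        simp [b1, b2, hvc, pv_mem_seen_succ]
  · intro u c' hg
    rw [PySem.Dict.get?_insert] at hg
    by_cases hup : u = pvVal toks (3 * k)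
    · rw [if_pos hup] at hg
      have hcc : c' = pvVal toks (3 * k + 1) := by simpa using hg.symm
      exact ⟨k, Nat.lt_succ_self k, hcc, hup ▸ hpm⟩
    · rw [if_neg hup] at hg
      obtain ⟨j, hj, h1, h2⟩ := hI.eL u c' hg
      exact ⟨j, Nat.lt_succ_of_lt hj, h1, h2⟩
  · intro u c' hg
    obtain ⟨j, hj, h1, h2⟩ := hI.eR u c' hg
    exact ⟨j, Nat.lt_succ_of_lt hj, h1, h2⟩
  · intro u1 u2 c' h1 h2
    rw [PySem.Dict.get?_insert] at h1 h2
    by_cases h1p : u1 = pvVal toks (3 * k) <;> by_cases h2p : u2 = pvVal toks (3 * k)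
    · rw [h1p, h2p]
    · rw [if_pos h1p] at h1
      rw [if_neg h2p] at h2
      have hcc : c' = pvVal toks (3 * k + 1) := by simpa using h1.symm
      exact absurd (hcc ▸ hoL u2 c' h2) hcm
    · rw [if_neg h1p] at h1
      rw [if_pos h2p] at h2
      have hcc : c' = pvVal toks (3 * k + 1) := by simpa using h2.symm
      exact absurd (hcc ▸ hoL u1 c' h1) hcm
    · rw [if_neg h1p] at h1
      rw [if_neg h2p] at h2
      exact hI.upL u1 u2 c' h1 h2
  · intro u1 u2 c' h1 h2
    rw [PySem.Dict.get?_insert] at h1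
    by_cases h1p : u1 = pvVal toks (3 * k)
    · rw [if_pos h1p] at h1
      have hcc : c' = pvVal toks (3 * k + 1) := by simpa using h1.symm
      exact absurd (hcc ▸ hoR u2 c' h2) hcm
    · rw [if_neg h1p] at h1
      exact hI.upX u1 u2 c' h1 h2

theorem pv_inv_step_R {toks : List String} {N k : Nat} {tree : PvNodeD}
    {lB rB : PySem.Dict Int Int} (hP : PvPre toks N) (hk : k < N)
    (hI : PvInv toks N k tree lB rB) :
    PvInv toks N (k + 1)
      ((tree.insert (pvVal toks (3 * k + 1)) (none, none)).modify (pvVal toks (3 * k))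
        (none, none) (fun pr => (pr.1, some (pvVal toks (3 * k + 1)))))
      lB (rB.insert (pvVal toks (3 * k)) (pvVal toks (3 * k + 1))) := by
  obtain ⟨hpm, hcm, hpc, hfl, hfr, hoL, hoR⟩ := pv_step_facts hP hk hI
  refine ⟨?_, ?_, ?_, ?_, hI.upL, ?_, ?_⟩
  · intro v
    simp only [PySem.Dict.getD_modify, PySem.Dict.getD_insert, PySem.Dict.get?_insert]
    by_cases hvp : v = pvVal toks (3 * k)
    · rw [if_pos hvp, if_pos hvp, if_neg hpc, hI.lookD, if_pos hpm,
        if_pos (pv_mem_seen_succ.mpr (Or.inl (hvp ▸ hpm)))]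
      rw [hvp]
    · rw [if_neg hvp, if_neg hvp]
      by_cases hvc : v = pvVal toks (3 * k + 1)
      · rw [if_pos hvc, if_pos (pv_mem_seen_succ.mpr (Or.inr hvc)), hvc, hfl, hfr]
      · rw [if_neg hvc, hI.lookD v]
        by_cases hvs : v ∈ pvSeen toks k
        · rw [if_pos hvs, if_pos (pv_mem_seen_succ.mpr (Or.inl hvs))]
        · rw [if_neg hvs, if_neg (fun h => (pv_mem_seen_succ.mp h).elim hvs hvc)]
  · intro v
    rw [PySem.Dict.contains_modify, PySem.Dict.contains_insert, hI.mem v]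
    by_cases hvp : v = pvVal toks (3 * k)
    · simp [hvp, pv_mem_seen_succ, hpm]
    · have b1 : (v == pvVal toks (3 * k)) = false := by simp [hvp]
      by_cases hvc : v = pvVal toks (3 * k + 1)
      · simp [hvc, pv_mem_seen_succ]
      · have b2 : (v == pvVal toks (3 * k + 1)) = false := by simp [hvc]
        simp [b1, b2, hvc, pv_mem_seen_succ]
  · intro u c' hg
    obtain ⟨j, hj, h1, h2⟩ := hI.eL u c' hg
    exact ⟨j, Nat.lt_succ_of_lt hj, h1, h2⟩
  · intro u c' hg
    rw [PySem.Dict.get?_insert] at hg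
    by_cases hup : u = pvVal toks (3 * k)
    · rw [if_pos hup] at hg
      have hcc : c' = pvVal toks (3 * k + 1) := by simpa using hg.symm
      exact ⟨k, Nat.lt_succ_self k, hcc, hup ▸ hpm⟩
    · rw [if_neg hup] at hg
      obtain ⟨j, hj, h1, h2⟩ := hI.eR u c' hg
      exact ⟨j, Nat.lt_succ_of_lt hj, h1, h2⟩
  · intro u1 u2 c' h1 h2
    rw [PySem.Dict.get?_insert] at h1 h2
    by_cases h1p : u1 = pvVal toks (3 * k) <;> by_cases h2p : u2 = pvVal toks (3 * k)
    · rw [h1p, h2p]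
    · rw [if_pos h1p] at h1
      rw [if_neg h2p] at h2
      have hcc : c' = pvVal toks (3 * k + 1) := by simpa using h1.symm
      exact absurd (hcc ▸ hoR u2 c' h2) hcm
    · rw [if_neg h1p] at h1
      rw [if_pos h2p] at h2
      have hcc : c' = pvVal toks (3 * k + 1) := by simpa using h2.symm
      exact absurd (hcc ▸ hoR u1 c' h1) hcm
    · rw [if_neg h1p] at h1
      rw [if_neg h2p] at h2
      exact hI.upR u1 u2 c' h1 h2
  · intro u1 u2 c' h1 h2
    rw [PySem.Dict.get?_insert] at h2
    by_cases h2p : u2 = pvVal toks (3 * k)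
    · rw [if_pos h2p] at h2
      have hcc : c' = pvVal toks (3 * k + 1) := by simpa using h2.symm
      exact absurd (hcc ▸ hoL u1 c' h1) hcm
    · rw [if_neg h2p] at h2
      exact hI.upX u1 u2 c' h1 h2

theorem pv_tok (toks : List String) (j : Nat) (hj : j < toks.length) :
    PySem.List.pyGet? toks (j : Int) = some (toks.getD j "") := by
  rw [PySem.List.pyGet?_natCast, List.getElem?_eq_getElem hj, List.getD_eq_getElem _ _ hj]

theorem pv_inv_init (toks : List String) (N : Nat) :
    PvInv toks N 0 ((PySem.Dict.empty).insert (pvVal toks 0) (none, none))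
      PySem.Dict.empty PySem.Dict.empty := by
  refine ⟨?_, ?_, ?_, ?_, ?_, ?_, ?_⟩
  · intro v
    rw [PySem.Dict.getD_insert]
    by_cases hv : v = pvVal toks 0
    · simp [hv, pvSeen]
    · simp [hv, pvSeen, PySem.Dict.getD_empty]
  · intro v
    rw [PySem.Dict.contains_insert]
    by_cases hv : v = pvVal toks 0 <;> simp [hv, pvSeen]
  · intro u c hg
    rw [PySem.Dict.get?_empty] at hg
    cases hg
  · intro u c hg
    rw [PySem.Dict.get?_empty] at hg
    cases hg
  all_goals intro u1 u2 c h1 h2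
  all_goals rw [PySem.Dict.get?_empty] at h1
  all_goals cases h1

-- one joint induction over the remaining triples relates the two construction loops
theorem pv_build {toks : List String} {N : Nat} (hP : PvPre toks N)
    (hlen : 3 * N ≤ toks.length) :
    ∀ m k (tree : PvNodeD) (lB rB : PySem.Dict Int Int), k + m = N →
      PvInv toks N k tree lB rB →
      ∃ tA lN rN,
        pvBuildA toks ((List.range' k m).map (fun i : Nat => 3 * (i : Int))) tree = some tA ∧
        pvBuildB toks ((List.range' k m).map (fun i : Nat => (i : Int))) (lB, rB) = some (lN, rN) ∧
        PvInv toks N N tA lN rN := by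
  intro m
  induction m with
  | zero =>
    intro k tree lB rB hkN hI
    have : k = N := by omega
    subst this
    exact ⟨tree, lB, rB, rfl, rfl, hI⟩
  | succ m ih =>
    intro k tree lB rB hkN hI
    have hk : k < N := by omega
    obtain ⟨hs1, hs2, hpm, hcm, _⟩ := hP k hk
    have h0 : 3 * k < toks.length := by omega
    have h1 : 3 * k + 1 < toks.length := by omega
    have h2 : 3 * k + 2 < toks.length := by omega
    have eA0 : PySem.List.pyGet? toks (3 * (k : Int)) = some (toks.getD (3 * k) "") := by
      have e : (3 : Int) * (k : Int) = ((3 * k : Nat) : Int) := by push_cast; ring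
      rw [e, pv_tok _ _ h0]
    have eA1 : PySem.List.pyGet? toks (3 * (k : Int) + 1) = some (toks.getD (3 * k + 1) "") := by
      have e : (3 : Int) * (k : Int) + 1 = ((3 * k + 1 : Nat) : Int) := by push_cast; ring
      rw [e, pv_tok _ _ h1]
    have eA2 : PySem.List.pyGet? toks (3 * (k : Int) + 2) = some (toks.getD (3 * k + 2) "") := by
      have e : (3 : Int) * (k : Int) + 2 = ((3 * k + 2 : Nat) : Int) := by push_cast; ring
      rw [e, pv_tok _ _ h2]
    have eP : PySem.Int.ofStr? (toks.getD (3 * k) "") = some (pvVal toks (3 * k)) := by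
      simpa [pvVal] using pv_some_getD hs1
    have eC : PySem.Int.ofStr? (toks.getD (3 * k + 1) "") = some (pvVal toks (3 * k + 1)) := by
      simpa [pvVal] using pv_some_getD hs2
    obtain ⟨pr, hpr⟩ : ∃ pr, tree.get? (pvVal toks (3 * k)) = some pr := by
      have hc := hI.mem (pvVal toks (3 * k))
      rw [PySem.Dict.contains_eq_isSome_get?] at hc
      rw [decide_eq_true hpm] at hc
      cases hg : tree.get? (pvVal toks (3 * k)) with
      | none => rw [hg] at hc; simp at hc
      | some pr => exact ⟨pr, rfl⟩
    simp only [List.range'_succ, List.map_cons]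
    rw [pvBuildA, pvBuildB]
    simp only [eA0, eA1, eA2, eP, eC, hpr]

    by_cases hdL : toks.getD (3 * k + 2) "" = "L"
    · rw [if_pos hdL, if_pos hdL]
      exact ih (k + 1) _ _ _ (by omega) (pv_inv_step_L hP hk hI)
    · rw [if_neg hdL, if_neg hdL]
      by_cases hdR : toks.getD (3 * k + 2) "" = "R"
      · rw [if_pos hdR, if_pos hdR]
        exact ih (k + 1) _ _ _ (by omega) (pv_inv_step_R hP hk hI)
      · rw [if_neg hdR, if_neg hdR]
        exact ih (k + 1) _ _ _ (by omega) (pv_inv_step_else hP hk hI)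

theorem pv_child_mem {toks : List String} {N : Nat} {tree : PvNodeD}
    {lB rB : PySem.Dict Int Int} (hI : PvInv toks N N tree lB rB) {v c : Int}
    (h : lB.get? v = some c ∨ rB.get? v = some c) : c ∈ pvSeen toks N := by
  obtain ⟨j, hj, hc, _⟩ := h.elim (hI.eL v c) (hI.eR v c)
  exact hc ▸ pv_mem_seen_of_val hj

-- a level containing no nodes contributes nothing
theorem pv_bfs_fold_nones (tree : PvNodeD) :
    ∀ (q : List (Option Int)) (acc : List Int) (accN : List (Option Int)),
      q.filterMap id = [] →
      q.foldl (fun (st : List Int × List (Option Int)) cur =>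
          match cur with
          | none => st
          | some v =>
            let pr := tree.getD v (none, none)
            (st.1 ++ [v], st.2 ++ [pr.1, pr.2])) (acc, accN) = (acc, accN) := by
  intro q
  induction q with
  | nil => intro acc accN _; rfl
  | cons x t ih =>
    intro acc accN hq
    cases x with
    | none =>
      simp only [List.filterMap_cons, id] at hq
      exact ih acc accN hq
    | some v => simp at hq

theorem pv_bfsA_none_queue {tree : PvNodeD} :
    ∀ (fuel : Nat) (q : List (Option Int)) (ret : List Int), q.filterMap id = [] →
      pvBfsA tree fuel q ret = ret := by
  intro fuel
  induction fuel with
  | zero => intro q ret _; rfl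
  | succ f ih =>
    intro q ret hq
    rw [pvBfsA]
    by_cases hqe : q.isEmpty
    · rw [if_pos hqe]
    · rw [if_neg hqe]
      rw [pv_bfs_fold_nones tree q ret [] hq]
      exact ih [] ret rfl

-- one level of A's queue (with Nones) against one level of B's value list
theorem pv_bfs_fold {toks : List String} {N : Nat} {tree : PvNodeD}
    {lB rB : PySem.Dict Int Int} (hI : PvInv toks N N tree lB rB) :
    ∀ (qA : List (Option Int)) (acc : List Int) (accN : List (Option Int)),
      (∀ v ∈ qA.filterMap id, v ∈ pvSeen toks N) →
      (∀ v ∈ accN.filterMap id, v ∈ pvSeen toks N) →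
      (qA.foldl (fun (st : List Int × List (Option Int)) cur =>
          match cur with
          | none => st
          | some v =>
            let pr := tree.getD v (none, none)
            (st.1 ++ [v], st.2 ++ [pr.1, pr.2])) (acc, accN)).1
        = ((qA.filterMap id).foldl (fun (st : List Int × List Int) v =>
            let s1 := st.1 ++ [v]
            let n1 := match lB.get? v with | some c => st.2 ++ [c] | none => st.2
            let n2 := match rB.get? v with | some c => n1 ++ [c] | none => n1
            (s1, n2)) (acc, accN.filterMap id)).1 ∧
      (qA.foldl (fun (st : List Int × List (Option Int)) cur =>
          match cur with
          | none => st
          | some v =>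
            let pr := tree.getD v (none, none)
            (st.1 ++ [v], st.2 ++ [pr.1, pr.2])) (acc, accN)).2.filterMap id
        = ((qA.filterMap id).foldl (fun (st : List Int × List Int) v =>
            let s1 := st.1 ++ [v]
            let n1 := match lB.get? v with | some c => st.2 ++ [c] | none => st.2
            let n2 := match rB.get? v with | some c => n1 ++ [c] | none => n1
            (s1, n2)) (acc, accN.filterMap id)).2 ∧
      (∀ v ∈ (qA.foldl (fun (st : List Int × List (Option Int)) cur =>
          match cur with
          | none => st
          | some v =>
            let pr := tree.getD v (none, none)
            (st.1 ++ [v], st.2 ++ [pr.1, pr.2])) (acc, accN)).2.filterMap id,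
        v ∈ pvSeen toks N) := by
  intro qA
  induction qA with
  | nil => exact fun acc accN _ hN => ⟨rfl, rfl, hN⟩
  | cons x t ih =>
    intro acc accN hq hN
    cases x with
    | none =>
      simp only [List.filterMap_cons, id] at hq ⊢
      exact ih acc accN hq hN
    | some v =>
      simp only [List.filterMap_cons, id, List.foldl_cons] at hq ⊢
      have hv : v ∈ pvSeen toks N := hq v (List.mem_cons_self ..)

      have hq' : ∀ w ∈ t.filterMap id, w ∈ pvSeen toks N :=
        fun w hw => hq w (List.mem_cons_of_mem _ hw)
      have hlook := hI.lookD v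
      rw [if_pos hv] at hlook
      cases hl : lB.get? v with
      | some lc =>
        cases hr : rB.get? v with
        | some rc =>
          have hmem : ∀ w ∈ (accN ++ [some lc, some rc]).filterMap id, w ∈ pvSeen toks N := by
            intro w hw
            rw [List.filterMap_append] at hw
            rcases List.mem_append.mp hw with hw | hw
            · exact hN w hw
            · simp at hw
              rcases hw with rfl | rfl
              · exact pv_child_mem hI (Or.inl hl)
              · exact pv_child_mem hI (Or.inr hr)
          simpa [hlook, hl, hr, List.filterMap_append] using
            ih (acc ++ [v]) (accN ++ [some lc, some rc]) hq' hmem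
        | none =>
          have hmem : ∀ w ∈ (accN ++ [some lc, none]).filterMap id, w ∈ pvSeen toks N := by
            intro w hw
            rw [List.filterMap_append] at hw
            rcases List.mem_append.mp hw with hw | hw
            · exact hN w hw
            · simp at hw
              subst hw
              exact pv_child_mem hI (Or.inl hl)
          simpa [hlook, hl, hr, List.filterMap_append] using
            ih (acc ++ [v]) (accN ++ [some lc, none]) hq' hmem
      | none =>
        cases hr : rB.get? v with
        | some rc =>
          have hmem : ∀ w ∈ (accN ++ [none, some rc]).filterMap id, w ∈ pvSeen toks N := by
            intro w hw
            rw [List.filterMap_append] at hw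
            rcases List.mem_append.mp hw with hw | hw
            · exact hN w hw
            · simp at hw
              subst hw
              exact pv_child_mem hI (Or.inr hr)
          simpa [hlook, hl, hr, List.filterMap_append] using
            ih (acc ++ [v]) (accN ++ [none, some rc]) hq' hmem
        | none =>
          have hmem : ∀ w ∈ (accN ++ [none, none]).filterMap id, w ∈ pvSeen toks N := by
            intro w hw
            rw [List.filterMap_append] at hw
            rcases List.mem_append.mp hw with hw | hw
            · exact hN w hw
            · simp at hw
          simpa [hlook, hl, hr, List.filterMap_append] using
            ih (acc ++ [v]) (accN ++ [none, none]) hq' hmem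

-- the two BFS loops agree level by level
theorem pv_bfs_main {toks : List String} {N : Nat} {tree : PvNodeD}
    {lB rB : PySem.Dict Int Int} (hI : PvInv toks N N tree lB rB) :
    ∀ (fuel : Nat) (qA : List (Option Int)) (ret : List Int),
      (∀ v ∈ qA.filterMap id, v ∈ pvSeen toks N) →
      pvBfsA tree fuel qA ret = pvBfsB lB rB fuel (qA.filterMap id) ret := by
  intro fuel
  induction fuel with
  | zero => intro qA ret _; rfl
  | succ f ih =>
    intro qA ret hq
    by_cases hqA : qA = []
    · subst hqA
      simp [pvBfsA, pvBfsB]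
    · rw [pvBfsA, pvBfsB]
      rw [if_neg (by simpa [List.isEmpty_iff] using hqA)]
      by_cases hqB : qA.filterMap id = []
      · rw [if_pos (by rw [hqB]; rfl)]
        rw [pv_bfs_fold_nones tree qA ret [] hqB]
        exact pv_bfsA_none_queue f [] ret rfl
      · rw [if_neg (by simpa [List.isEmpty_iff] using hqB)]
        obtain ⟨h1, h2, h3⟩ := pv_bfs_fold hI qA ret [] hq (by simp)
        simp only [List.filterMap_nil] at h1 h2
        simp only [] at h1 h2 ⊢
        rw [h1, ← h2]
        exact ih _ _ h3

-- reading and writing the fixed 1001-slot visited array at an in-range value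
theorem pv_vis_set {vis : List Bool} (hlen : vis.length = 1001) {v : Int}
    (h0 : 0 ≤ v) (h1 : v ≤ 1000) (mark : Int → Bool)
    (hm : ∀ w, 0 ≤ w → w ≤ 1000 → PySem.List.pyGet? vis w = some (mark w)) :
    (PySem.List.pySetD vis v true).length = 1001 ∧
    (∀ w, 0 ≤ w → w ≤ 1000 →
      PySem.List.pyGet? (PySem.List.pySetD vis v true) w
        = some (if w = v then true else mark w)) := by
  have hidx : PySem.List.pyIdx? vis.length v = some v.toNat := by
    simp only [PySem.List.pyIdx?, hlen]
    rw [if_pos h0, if_pos (by omega)]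
  constructor
  · rw [PySem.List.length_pySetD]
    exact hlen
  · intro w hw0 hw1
    have hwidx : PySem.List.pyIdx? (PySem.List.pySetD vis v true).length w = some w.toNat := by
      simp only [PySem.List.pyIdx?, PySem.List.length_pySetD, hlen]
      rw [if_pos hw0, if_pos (by omega)]
    have hset : PySem.List.pySetD vis v true = vis.set v.toNat true := by
      simp only [PySem.List.pySetD, PySem.List.pySet?, hidx, Option.map_some, Option.getD_some]
    rw [PySem.List.pyGet?, hwidx]
    simp only [Option.bind_some]
    rw [hset, List.getElem?_set]
    have hmw := hm w hw0 hw1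
    rw [PySem.List.pyGet?] at hmw
    have hwidx' : PySem.List.pyIdx? vis.length w = some w.toNat := by
      simp only [PySem.List.pyIdx?, hlen]
      rw [if_pos hw0, if_pos (by omega)]
    rw [hwidx'] at hmw
    simp only [Option.bind_some] at hmw
    by_cases hwv : w = v
    · rw [if_pos (by rw [hwv]), if_pos hwv]
      have : v.toNat < vis.length := by omega
      rw [if_pos this]
    · rw [if_neg (fun h => hwv (by omega)), if_neg hwv]
      exact hmw

-- A's stack-and-visited walk consumes one subtree exactly as B's recursion emits it
theorem pv_ino_main {toks : List String} {N : Nat} {tree : PvNodeD}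
    {lB rB : PySem.Dict Int Int} (hI : PvInv toks N N tree lB rB)
    (hnd : (pvSeen toks N).Nodup)
    (hrange : ∀ w ∈ pvSeen toks N, 0 ≤ w ∧ w ≤ 1000) :
    ∀ (fuelB : Nat) (v : Int) (st : List (Option Int)) (vis : List Bool)
      (mark : Int → Bool) (ret : List Int),
      v ∈ pvSeen toks N →
      vis.length = 1001 →
      (∀ w, 0 ≤ w → w ≤ 1000 → PySem.List.pyGet? vis w = some (mark w)) →
      (∀ w, pvReach lB rB v w → mark w = false) →
      (pvSeen toks N).length ≤ (pvSeen toks N).idxOf v + fuelB →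
      ∃ (vis' : List Bool) (mark' : Int → Bool),
        pvInoA tree (some v :: st) vis ret
          = pvInoA tree st vis' (pvInoB lB rB fuelB v ret) ∧
        vis'.length = 1001 ∧
        (∀ w, 0 ≤ w → w ≤ 1000 → PySem.List.pyGet? vis' w = some (mark' w)) ∧
        (∀ w, mark' w = true ↔ (mark w = true ∨ pvReach lB rB v w)) := by
  intro fuelB
  induction fuelB with
  | zero =>
    intro v st vis mark ret hv hlen hm hfresh hfuel
    have := List.idxOf_lt_length_of_mem hv
    omega
  | succ g ih =>
    intro v st vis mark ret hv hlen hm hfresh hfuel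
    obtain ⟨hv0, hv1⟩ := hrange v hv
    have hgv : PySem.List.pyGet? vis v = some false := by
      rw [hm v hv0 hv1, hfresh v Relation.ReflTransGen.refl]
    have hlookv := hI.lookD v
    rw [if_pos hv] at hlookv
    obtain ⟨hlen1, hm1⟩ := pv_vis_set hlen hv0 hv1 mark hm
    -- one optional child, handled uniformly
    have step : ∀ (copt : Option Int) (st' : List (Option Int)) (vis0 : List Bool)
        (mark0 : Int → Bool) (ret0 : List Int),
        (∀ c, copt = some c → pvEdge lB rB v c) →
        vis0.length = 1001 →
        (∀ w, 0 ≤ w → w ≤ 1000 → PySem.List.pyGet? vis0 w = some (mark0 w)) →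
        (∀ w c, copt = some c → pvReach lB rB c w → mark0 w = false) →
        ∃ (vis' : List Bool) (mark' : Int → Bool),
          pvInoA tree (copt :: st') vis0 ret0
            = pvInoA tree st' vis'
              (match copt with | some c => pvInoB lB rB g c ret0 | none => ret0) ∧
          vis'.length = 1001 ∧
          (∀ w, 0 ≤ w → w ≤ 1000 → PySem.List.pyGet? vis' w = some (mark' w)) ∧
          (∀ w, mark' w = true ↔
            (mark0 w = true ∨ ∃ c, copt = some c ∧ pvReach lB rB c w)) := by
      intro copt st' vis0 mark0 ret0 hedge hlen0 hm0 hfresh0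
      cases copt with
      | none =>
        refine ⟨vis0, mark0, ?_, hlen0, hm0, ?_⟩
        · rw [pvInoA]
        · intro w; simp
      | some c =>
        have hed : pvEdge lB rB v c := hedge c rfl
        obtain ⟨hcm, _, hlt⟩ := pv_idx_edge hI hnd hed
        have hfuel' : (pvSeen toks N).length ≤ (pvSeen toks N).idxOf c + g := by omega
        obtain ⟨vis', mark', he, h1, h2, h3⟩ :=
          ih c st' vis0 mark0 ret0 hcm hlen0 hm0
            (fun w hw => hfresh0 w c rfl hw) hfuel'
        refine ⟨vis', mark', he, h1, h2, ?_⟩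
        intro w
        rw [h3 w]
        simp
    -- process the left child
    obtain ⟨vis2, mark2, he2, hlen2, hm2, hiff2⟩ :=
      step (lB.get? v) (some v :: rB.get? v :: st) (PySem.List.pySetD vis v true)
        (fun w => if w = v then true else mark w) ret
        (fun c hc => Or.inl hc) hlen1 hm1
        (by
          intro w c hc hw
          have hne : w ≠ v := fun h => pv_no_reach_back hI hnd (Or.inl hc) (h ▸ hw)
          show (if w = v then true else mark w) = false
          rw [if_neg hne]
          exact hfresh w (Relation.ReflTransGen.head (Or.inl hc) hw))
    have hm2v : mark2 v = true := (hiff2 v).mpr (Or.inl (by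
      show (if v = v then true else mark v) = true
      rw [if_pos rfl]))
    -- process the right child, after the node itself is emitted
    obtain ⟨vis3, mark3, he3, hlen3, hm3, hiff3⟩ :=
      step (rB.get? v) st vis2 mark2
        ((match lB.get? v with | some c => pvInoB lB rB g c ret | none => ret) ++ [v])
        (fun c hc => Or.inr hc) hlen2 hm2
        (by
          intro w c hc hw
          cases hmk : mark2 w with
          | false => rfl
          | true =>
            exfalso
            rcases (hiff2 w).mp hmk with hm1w | ⟨c', hc', hw'⟩
            · by_cases hwv : w = v
              · exact pv_no_reach_back hI hnd (Or.inr hc) (hwv ▸ hw)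
              · rw [if_neg hwv] at hm1w
                have := hfresh w (Relation.ReflTransGen.head (Or.inr hc) hw)
                rw [this] at hm1w
                cases hm1w
            · exact pv_child_disjoint hI hnd hc' hc hw' hw)
    refine ⟨vis3, mark3, ?_, hlen3, hm3, ?_⟩
    · -- the traversal equation
      have hAstep : pvInoA tree (some v :: st) vis ret
          = pvInoA tree (lB.get? v :: some v :: rB.get? v :: st)
              (PySem.List.pySetD vis v true) ret := by
        rw [pvInoA]
        split
        all_goals rename_i h'
        all_goals try rw [hgv] at h'
        all_goals try simp at h'
        simp [hlookv]
      have hgv2 : PySem.List.pyGet? vis2 v = some true := by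
        rw [hm2 v hv0 hv1, hm2v]
      have hApop : pvInoA tree (some v :: rB.get? v :: st) vis2
            (match lB.get? v with | some c => pvInoB lB rB g c ret | none => ret)
          = pvInoA tree (rB.get? v :: st) vis2
            ((match lB.get? v with | some c => pvInoB lB rB g c ret | none => ret) ++ [v]) := by
        rw [pvInoA]
        split
        all_goals rename_i h'
        all_goals try rw [hgv2] at h'
        all_goals try simp at h'
      rw [hAstep, he2, hApop, he3, pvInoB]
    · -- the exact marking
      intro w
      rw [hiff3 w]
      constructor
      · rintro (hm2w | ⟨c, hc, hw⟩)
        · rcases (hiff2 w).mp hm2w with hm1w | ⟨c, hc, hw⟩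
          · by_cases hwv : w = v
            · exact Or.inr (hwv ▸ Relation.ReflTransGen.refl)
            · rw [if_neg hwv] at hm1w
              exact Or.inl hm1w
          · exact Or.inr (Relation.ReflTransGen.head (Or.inl hc) hw)
        · exact Or.inr (Relation.ReflTransGen.head (Or.inr hc) hw)
      · rintro (hmw | hvw)
        · exact Or.inl ((hiff2 w).mpr (Or.inl (by
            show (if w = v then true else mark w) = true
            by_cases hwv : w = v
            · rw [if_pos hwv]
            · rw [if_neg hwv]; exact hmw)))
        · rcases Relation.ReflTransGen.cases_head hvw with rfl | ⟨x, hx, hxw⟩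
          · exact Or.inl ((hiff2 v).mpr (Or.inl (by
              show (if v = v then true else mark v) = true
              rw [if_pos rfl])))
          · rcases hx with hx | hx
            · exact Or.inl ((hiff2 w).mpr (Or.inr ⟨x, hx, hxw⟩))
            · exact Or.inr ⟨x, hx, hxw⟩

theorem pv_vis_init (w : Int) (h0 : 0 ≤ w) (h1 : w ≤ 1000) :
    PySem.List.pyGet? (List.replicate 1001 (false : Bool)) w = some false := by
  have hidx : PySem.List.pyIdx? (List.replicate 1001 (false : Bool)).length w
      = some w.toNat := by
    simp only [PySem.List.pyIdx?, List.length_replicate]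
    rw [if_pos h0, if_pos (by omega)]
  rw [PySem.List.pyGet?, hidx, Option.bind_some]
  rw [List.getElem?_replicate]
  rw [if_pos (by omega)]

theorem pv_range3 (n : Int) :
    PySem.List.pyRange 0 (3 * n) 3
      = (List.range' 0 n.toNat).map (fun i : Nat => 3 * (i : Int)) := by
  rw [PySem.List.pyRange_of_pos _ _ (by norm_num)]
  rw [← List.range_eq_range']
  by_cases hn : 0 < n
  · rw [if_pos (by omega)]
    have he : (3 * n - 0 + 3 - 1) / 3 = n := by omega
    rw [he]
    simp
  · rw [if_neg (by omega)]
    have : n.toNat = 0 := by omega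
    simp [this]

theorem pv_range1 (n : Int) :
    PySem.List.pyRange 0 n 1
      = (List.range' 0 n.toNat).map (fun i : Nat => (i : Int)) := by
  rw [PySem.List.pyRange_one]
  rw [← List.range_eq_range']
  simp

-- ===== VERDICT (by name: the statement is the Claim_ definition above) =====
theorem solve_spec : Claim_equal_solve := by
  intro n nodes hDom hPre
  obtain ⟨hne, hlen3, hs0, h40, h41, hP⟩ := hPre
  show solve n nodes = solve_alt n nodes
  have hlenpos : 0 < (PySem.Str.split₀ nodes).length := List.length_pos_of_ne_nil hne
  have e0 : PySem.List.pyGet? (PySem.Str.split₀ nodes) (0 : Int)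
      = some ((PySem.Str.split₀ nodes).getD 0 "") := by
    simpa using pv_tok (PySem.Str.split₀ nodes) 0 hlenpos
  have eV : PySem.Int.ofStr? ((PySem.Str.split₀ nodes).getD 0 "")
      = some (pvVal (PySem.Str.split₀ nodes) 0) := by
    simpa [pvVal] using pv_some_getD hs0
  obtain ⟨tA, lN, rN, hbA, hbB, hInv⟩ :=
    pv_build hP hlen3 n.toNat 0
      ((PySem.Dict.empty).insert (pvVal (PySem.Str.split₀ nodes) 0) (none, none))
      PySem.Dict.empty PySem.Dict.empty (by omega)
      (pv_inv_init (PySem.Str.split₀ nodes) n.toNat)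
  have hnd := pvSeen_nodup hP
  have hrange := pvSeen_range hP ⟨h40, h41⟩
  have hv0 : pvVal (PySem.Str.split₀ nodes) 0 ∈ pvSeen (PySem.Str.split₀ nodes) n.toNat :=
    List.mem_cons_self ..
  have hbfs := pv_bfs_main hInv ((PySem.Str.split₀ nodes).length + 2)
    [some (pvVal (PySem.Str.split₀ nodes) 0)] []
    (by
      intro w hw
      simp at hw
      exact hw ▸ hv0)
  have hfuel : (pvSeen (PySem.Str.split₀ nodes) n.toNat).length
      ≤ (pvSeen (PySem.Str.split₀ nodes) n.toNat).idxOf (pvVal (PySem.Str.split₀ nodes) 0)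
        + ((PySem.Str.split₀ nodes).length + 2) := by
    have h1 : (pvSeen (PySem.Str.split₀ nodes) n.toNat).length = n.toNat + 1 := by
      simp [pvSeen]
    omega
  obtain ⟨vis', mark', hino, _, _, _⟩ :=
    pv_ino_main hInv hnd hrange ((PySem.Str.split₀ nodes).length + 2)
      (pvVal (PySem.Str.split₀ nodes) 0) [] (List.replicate 1001 false) (fun _ => false) []
      hv0 (List.length_replicate ..)
      (fun w hw0 hw1 => pv_vis_init w hw0 hw1)
      (fun w _ => rfl) hfuel
  rw [solve, solve_alt]
  simp only [e0, eV, pv_range3, pv_range1, hbA, hbB]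
  rw [hbfs]
  simp only [List.filterMap_cons, id, List.filterMap_nil]
  rw [hino, pvInoA]
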